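-- pv_equiv track=rewrite | github.com/Vinod-Jaggavarapu6/DSA | 3.Arrays/3.Arrays-Hard.py | majorityElementHashing
-- ===== SOURCE A (Python) =====
-- from typing import List
-- import math
--
-- def majorityElementHashing(nums:List[int])->List[int]:
--     res = []
--     count_map = {}
--     n = len(nums)
--
--     for num in nums:
--         if num in count_map:
--             count_map[num]+=1
--         else:
--             count_map[num] = 1
--
--     for num in count_map.keys():
--         if count_map[num] > math.floor(n/3):
--             res.append(num)
--
--     return res
-- ===== SOURCE B (Python) =====
-- from typing import List
--
-- def majorityElementHashing(nums: List[int]) -> List[int]: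
--     # Extended Boyer-Moore majority vote: one cancellation pass keeps at most
--     # two candidates (any value occurring > n/3 times must be one of them),
--     # then each surviving candidate is verified and the pair is put in
--     # first-occurrence order.
--     n = len(nums)
--     c1, k1, c2, k2 = None, 0, None, 0
--     for x in nums:
--         if c1 == x:
--             k1 += 1
--         elif c2 == x:
--             k2 += 1
--         elif k1 == 0:
--             c1, k1 = x, 1
--         elif k2 == 0:
--             c2, k2 = x, 1
--         else:
--             k1 -= 1
--             k2 -= 1
--     res = [c for c in (c1, c2) if c is not None and 3 * nums.count(c) > n]
--     if len(res) == 2 and nums.index(res[0]) > nums.index(res[1]):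
--         res.reverse()
--     return res
-- ===== Notes on version B (the rewrite author's own statement) =====
-- stated objective: faster
-- what changed: Replaces the frequency-table pass with the extended Boyer-Moore majority-vote algorithm: one cancellation scan keeps at most two candidates, which are then verified by counting and put in first-occurrence order.
import Mathlib
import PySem

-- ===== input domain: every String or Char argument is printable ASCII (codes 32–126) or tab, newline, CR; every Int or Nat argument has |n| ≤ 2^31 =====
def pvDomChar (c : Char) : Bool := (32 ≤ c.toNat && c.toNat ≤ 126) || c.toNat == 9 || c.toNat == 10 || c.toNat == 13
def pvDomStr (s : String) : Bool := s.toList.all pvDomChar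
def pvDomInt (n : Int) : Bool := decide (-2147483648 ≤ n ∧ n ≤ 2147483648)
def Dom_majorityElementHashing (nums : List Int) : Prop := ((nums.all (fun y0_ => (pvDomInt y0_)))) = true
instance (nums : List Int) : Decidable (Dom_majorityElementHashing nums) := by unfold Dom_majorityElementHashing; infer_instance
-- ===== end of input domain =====

-- B replaces A's full frequency table with the extended Boyer-Moore majority-vote pass:
-- one cancellation scan keeps at most two candidates, which are then verified and put in
-- first-occurrence order (different algorithm; a timing run measured B faster).
-- ===== PORT A =====
-- math.floor(n/3) on a list length n: exact — float n/3 floors to n//3 for all 0 ≤ n < 2^53, ported as PySem.Int.floordiv n 3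
def majorityElementHashing (nums : List Int) : List Int :=
  let n : Int := PySem.List.len nums
  let count_map : PySem.Dict Int Int :=
    nums.foldl
      (fun d num =>
        if d.contains num then d.insert num (d.getD num 0 + 1)
        else d.insert num 1)
      PySem.Dict.empty
  (PySem.Dict.keys count_map).foldl
    (fun res num =>
      if count_map.getD num 0 > PySem.Int.floordiv n 3 then res ++ [num] else res)
    []

-- ===== PORT B =====
-- one step of the extended Boyer-Moore vote on the state (c1, k1, c2, k2);
-- Python's 'None' candidate is 'none', 'c1 == x' is 'c1 = some x'
def bmStep (s : Option Int × Int × Option Int × Int) (x : Int) :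
    Option Int × Int × Option Int × Int :=
  match s with
  | (c1, k1, c2, k2) =>
    if c1 = some x then (c1, k1 + 1, c2, k2)
    else if c2 = some x then (c1, k1, c2, k2 + 1)
    else if k1 = 0 then (some x, 1, c2, k2)
    else if k2 = 0 then (c1, k1, some x, 1)
    else (c1, k1 - 1, c2, k2 - 1)

def majorityElementHashing_alt (nums : List Int) : List Int :=
  let n : Int := PySem.List.len nums
  let s := nums.foldl bmStep (none, 0, none, 0)
  -- [c for c in (c1, c2) if c is not None and 3 * nums.count(c) > n]
  let res : List Int :=
    ([s.1, s.2.2.1].filterMap id).filter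
      (fun c => decide (3 * (PySem.List.count nums c : Int) > n))
  -- every element of res occurs in nums (its count is positive), so Python's nums.index
  -- cannot raise here; '(index? …).getD 0' is exact on this call
  if res.length = 2 ∧
      (PySem.List.index? nums (res.getD 0 0)).getD 0 > (PySem.List.index? nums (res.getD 1 0)).getD 0
  then res.reverse
  else res

-- ===== PRECONDITION & SPEC =====
def Spec_majorityElementHashing (nums : List Int) (out : List Int) : Prop := out = majorityElementHashing_alt nums
instance (nums : List Int) (out : List Int) : Decidable (Spec_majorityElementHashing nums out) := by unfold Spec_majorityElementHashing; infer_instance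

-- ===== CLAIM (what is proved, stated in full; the proofs are below) =====
def Claim_equal_majorityElementHashing : Prop := ∀ (nums : List Int), Dom_majorityElementHashing nums → Spec_majorityElementHashing nums (majorityElementHashing nums)

-- ===== LEMMAS AND PROOFS =====

-- A's branching counter loop is pointwise Counter(nums): in the else-branch the key is absent, so getD is 0.
lemma countLoop_eq_counter (nums : List Int) :
    nums.foldl
      (fun d num =>
        if d.contains num then d.insert num (d.getD num 0 + 1)
        else d.insert num 1)
      PySem.Dict.empty = PySem.Dict.counter nums := by
  rw [← PySem.Dict.foldl_insert_getD_add_one_eq_counter]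
  congr 1
  funext d num
  by_cases h : d.contains num
  · simp [h]
  · rw [PySem.Dict.getD_of_not_contains d 0 (by simpa using h)]
    simp [h]

-- A's output is: first occurrences of nums, filtered by 3·count > length
-- (count > ⌊n/3⌋ ↔ 3·count > n for n ≥ 0).
lemma A_eq_dedup_filter (nums : List Int) :
    majorityElementHashing nums =
      (PySem.List.dedup nums).filter
        (fun v => decide (3 * (PySem.List.count nums v : Int) > PySem.List.len nums)) := by
  unfold majorityElementHashing
  simp only [countLoop_eq_counter, PySem.Dict.keys_counter, PySem.Dict.getD_counter,
    ← PySem.List.dedup_eq_ofList]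
  rw [show (fun (res : List Int) num => if (List.count num nums : Int) > PySem.Int.floordiv (PySem.List.len nums) 3 then res ++ [num] else res)
      = (fun res num => if (decide (3 * (PySem.List.count nums num : Int) > PySem.List.len nums)) = true then res ++ [id num] else res) from by
    funext res num
    congr 1
    rw [PySem.List.count_eq]
    simp only [PySem.List.len]
    rw [PySem.Int.floordiv_eq_ediv_of_pos (by norm_num : (0:Int) < 3)]
    simp only [gt_iff_lt, decide_eq_true_eq, eq_iff_iff]
    omega]
  rw [PySem.List.foldl_append_if]
  simp

-- multiplicities a Boyer-Moore state can still "owe" to its candidates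
def bmWt (s : Option Int × Int × Option Int × Int) (v : Int) : Int :=
  (if s.1 = some v then 3 * s.2.1 else 0) + (if s.2.2.1 = some v then 3 * s.2.2.2 else 0)

-- the vote invariant: counters are nonnegative, candidates distinct, and every value's
-- count is bounded by the uncancelled part of the prefix plus what its candidate slot holds
def BMInv (l : List Int) (s : Option Int × Int × Option Int × Int) : Prop :=
  0 ≤ s.2.1 ∧ 0 ≤ s.2.2.2 ∧
  (∀ v : Int, s.1 = some v → s.2.2.1 ≠ some v) ∧
  (∀ v : Int, 3 * (l.count v : Int) ≤ (l.length : Int) - s.2.1 - s.2.2.2 + bmWt s v)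

lemma bmStep_inv {l : List Int} {s : Option Int × Int × Option Int × Int}
    (h : BMInv l s) (x : Int) : BMInv (l ++ [x]) (bmStep s x) := by
  obtain ⟨c1, k1, c2, k2⟩ := s
  obtain ⟨hk1, hk2, hdist, hcnt⟩ := h
  simp only at hk1 hk2 hdist hcnt
  have hcv : ∀ v : Int, ((l ++ [x]).count v : Int) =
      (l.count v : Int) + (if v = x then 1 else 0) := by
    intro v
    rcases eq_or_ne v x with rfl | hv
    · simp [List.count_append]
    · simp [List.count_append, hv, Ne.symm hv]
  have hlen : (((l ++ [x]).length : Nat) : Int) = (l.length : Int) + 1 := by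
    simp
  simp only [bmStep]
  split_ifs with h1 h2 h3 h4
  · -- x == c1: k1 increments
    refine ⟨by simp only; omega, by simpa using hk2, by simpa using hdist, ?_⟩
    intro v
    have hc := hcnt v
    simp only [bmWt] at hc ⊢
    rw [hcv v, hlen]
    by_cases hvx : v = x
    · subst hvx
      rw [if_pos h1, if_neg (hdist v h1)] at hc ⊢
      omega
    · have hv1 : ¬ c1 = some v := fun hv1 => hvx (Option.some.inj (h1.symm.trans hv1)).symm
      rw [if_neg hv1] at hc ⊢
      split_ifs at hc ⊢ <;> omega
  · -- x == c2: k2 increments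
    refine ⟨by simpa using hk1, by simp only; omega, by simpa using hdist, ?_⟩
    intro v
    have hc := hcnt v
    simp only [bmWt] at hc ⊢
    rw [hcv v, hlen]
    by_cases hvx : v = x
    · subst hvx
      rw [if_neg h1, if_pos h2] at hc ⊢
      omega
    · have hv2 : ¬ c2 = some v := fun hv2 => hvx (Option.some.inj (h2.symm.trans hv2)).symm
      rw [if_neg hv2] at hc ⊢
      split_ifs at hc ⊢ <;> omega
  · -- k1 == 0: first slot takes x
    refine ⟨by norm_num, by simpa using hk2, ?_, ?_⟩
    · intro v hv
      simp only at hv ⊢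
      rcases Option.some.inj hv with rfl
      exact fun hc2 => h2 hc2
    · intro v
      have hc := hcnt v
      simp only [bmWt] at hc ⊢
      rw [hcv v, hlen]
      subst h3
      by_cases hvx : v = x
      · subst hvx
        have e1 : (if v = v then (1:Int) else 0) = 1 := if_pos rfl
        have e2 : (if (some v : Option Int) = some v then 3 * (1:Int) else 0) = 3 := by norm_num
        rw [e1, e2, if_neg h2]
        rw [if_neg h1, if_neg h2] at hc
        omega
      · rw [if_neg (fun hsv => hvx (Option.some.inj hsv).symm)]
        split_ifs at hc ⊢ <;> omega
  · -- k2 == 0: second slot takes x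
    refine ⟨by simpa using hk1, by norm_num, ?_, ?_⟩
    · intro v hv hsv
      simp only at hv hsv
      rcases Option.some.inj hsv with rfl
      exact h1 hv
    · intro v
      have hc := hcnt v
      simp only [bmWt] at hc ⊢
      rw [hcv v, hlen]
      subst h4
      by_cases hvx : v = x
      · subst hvx
        have e1 : (if v = v then (1:Int) else 0) = 1 := if_pos rfl
        have e2 : (if (some v : Option Int) = some v then 3 * (1:Int) else 0) = 3 := by norm_num
        rw [e1, e2, if_neg h1]
        rw [if_neg h1, if_neg h2] at hc
        omega
      · rw [if_neg (fun hsv => hvx (Option.some.inj hsv).symm)]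
        split_ifs at hc ⊢ <;> omega
  · -- cancellation: both counters decrement
    refine ⟨by simp only; omega, by simp only; omega, by simpa using hdist, ?_⟩
    intro v
    have hc := hcnt v
    simp only [bmWt] at hc ⊢
    rw [hcv v, hlen]
    by_cases hv1 : c1 = some v
    · have hv2 : ¬ c2 = some v := hdist v hv1
      have hvx : ¬ v = x := fun hvx => h1 (hvx ▸ hv1)
      rw [if_pos hv1, if_neg hv2] at hc ⊢
      rw [if_neg hvx]
      omega
    · rw [if_neg hv1] at hc ⊢
      by_cases hv2 : c2 = some v
      · have hvx : ¬ v = x := fun hvx => h2 (hvx ▸ hv2)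
        rw [if_pos hv2] at hc ⊢
        rw [if_neg hvx]
        omega
      · rw [if_neg hv2] at hc ⊢
        split_ifs at hc ⊢ <;> omega

lemma bm_fold_inv (l : List Int) : ∀ (acc : List Int) (s : Option Int × Int × Option Int × Int),
    BMInv acc s → BMInv (acc ++ l) (l.foldl bmStep s) := by
  induction l with
  | nil => intro acc s h; simpa using h
  | cons x t ih =>
    intro acc s h
    have := ih (acc ++ [x]) (bmStep s x) (bmStep_inv h x)
    simpa using this

lemma bm_inv (nums : List Int) : BMInv nums (nums.foldl bmStep (none, 0, none, 0)) := by
  have := bm_fold_inv nums [] (none, 0, none, 0)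
    ⟨le_refl 0, le_refl 0, by simp, by intro v; simp [bmWt]⟩
  simpa using this

-- any value occurring more than n/3 times survives the vote as one of the two candidates
lemma bm_candidate {nums : List Int} {v : Int}
    (h3 : 3 * (nums.count v : Int) > (nums.length : Int)) :
    (nums.foldl bmStep (none, 0, none, 0)).1 = some v ∨
    (nums.foldl bmStep (none, 0, none, 0)).2.2.1 = some v := by
  obtain ⟨hk1, hk2, _, hcnt⟩ := bm_inv nums
  by_contra hcon
  rw [not_or] at hcon
  have hc := hcnt v
  rw [bmWt, if_neg hcon.1, if_neg hcon.2] at hc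
  omega

-- first-occurrence dedup, peeled from the front
lemma dedup_cons (x : Int) (t : List Int) :
    PySem.List.dedup (x :: t) = x :: (PySem.List.dedup t).filter (fun y => decide (y ≠ x)) := by
  simp only [PySem.List.dedup_eq_ofList, PySem.Set.ofList_cons, ne_eq, decide_not,
    List.cons.injEq, true_and, PySem.Set.discard]
  apply List.filter_congr
  intro y _
  rw [Bool.beq_eq_decide_eq y x]

-- elements of the dedup are listed in order of their first occurrence
lemma dedup_pairwise_idx (l : List Int) :
    (PySem.List.dedup l).Pairwise (fun u v => l.idxOf u < l.idxOf v) := by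
  induction l with
  | nil => simp [PySem.List.dedup]
  | cons x t ih =>
    rw [dedup_cons, List.pairwise_cons]
    constructor
    · intro v hv
      have hvx : v ≠ x := by simpa using (List.mem_filter.mp hv).2
      rw [List.idxOf_cons_eq t rfl, List.idxOf_cons_ne t (Ne.symm hvx)]
      omega
    · refine (ih.filter _).imp_of_mem ?_
      intro u v hu hv huv
      have hux : u ≠ x := by simpa using (List.mem_filter.mp hu).2
      have hvx : v ≠ x := by simpa using (List.mem_filter.mp hv).2
      rw [List.idxOf_cons_ne t (Ne.symm hux), List.idxOf_cons_ne t (Ne.symm hvx)]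
      omega

lemma getD_index?_of_mem {l : List Int} {v : Int} (h : v ∈ l) :
    (PySem.List.index? l v).getD 0 = l.idxOf v := by
  rw [PySem.List.index?_eq_idxOf?]
  have hs : (List.idxOf? v l).isSome := by
    rw [← PySem.List.index?_eq_idxOf?]
    exact (PySem.List.index?_isSome_iff l v).mpr h
  obtain ⟨k, hk⟩ := Option.isSome_iff_exists.mp hs
  rw [List.idxOf_eq_getD_idxOf?, hk]
  simp

-- a Nodup list containing b whose members all equal b is [b]
lemma eq_singleton_of_unique {t : List Int} {b : Int} (hnd : t.Nodup) (hb : b ∈ t)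
    (hu : ∀ c ∈ t, c = b) : t = [b] := by
  rcases t with _ | ⟨y, s⟩
  · cases hb
  · obtain rfl := hu y (List.mem_cons_self)
    rw [List.nodup_cons] at hnd
    have hs : s = [] := List.eq_nil_iff_forall_not_mem.mpr
      (fun c hc => hnd.1 ((hu c (List.mem_cons_of_mem _ hc)) ▸ hc))
    rw [hs]

-- a Nodup list whose members are exactly {a, b} is [a, b] or [b, a]
lemma nodup_two_mem {l : List Int} {a b : Int} (hnd : l.Nodup) (hab : a ≠ b)
    (hmem : ∀ x, x ∈ l ↔ x = a ∨ x = b) : l = [a, b] ∨ l = [b, a] := by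
  have ha : a ∈ l := (hmem a).mpr (Or.inl rfl)
  have hb : b ∈ l := (hmem b).mpr (Or.inr rfl)
  rcases l with _ | ⟨x, t⟩
  · cases ha
  · rw [List.nodup_cons] at hnd
    rcases (hmem x).mp List.mem_cons_self with rfl | rfl
    · left
      have hbt : b ∈ t := by
        rcases List.mem_cons.mp hb with rfl | h
        · exact absurd rfl hab
        · exact h
      have ht : t = [b] := eq_singleton_of_unique hnd.2 hbt (fun c hc => by
        rcases (hmem c).mp (List.mem_cons_of_mem _ hc) with rfl | rfl
        · exact absurd hc hnd.1
        · rfl)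
      rw [ht]
    · right
      have hat : a ∈ t := by
        rcases List.mem_cons.mp ha with rfl | h
        · exact absurd rfl hab.symm
        · exact h
      have ht : t = [a] := eq_singleton_of_unique hnd.2 hat (fun c hc => by
        rcases (hmem c).mp (List.mem_cons_of_mem _ hc) with rfl | rfl
        · rfl
        · exact absurd hc hnd.1)
      rw [ht]

lemma AB_eq (nums : List Int) : majorityElementHashing nums = majorityElementHashing_alt nums := by
  rw [A_eq_dedup_filter]
  simp only [majorityElementHashing_alt]
  set s := nums.foldl bmStep ((none : Option Int), (0 : Int), (none : Option Int), (0 : Int)) with hs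
  set q : Int → Bool := fun v => decide (3 * (PySem.List.count nums v : Int) > PySem.List.len nums) with hq
  set res := ([s.1, s.2.2.1].filterMap id).filter q with hres
  have hdist := (bm_inv nums).2.2.1
  rw [← hs] at hdist
  have hqn : ∀ v, q v = true → 3 * (nums.count v : Int) > (nums.length : Int) := by
    intro v hv
    rw [hq] at hv
    simp only [PySem.List.count_eq, PySem.List.len, decide_eq_true_eq] at hv
    exact hv
  have hqmem : ∀ v, q v = true → v ∈ nums := by
    intro v hv
    have hv' := hqn v hv
    have h0 : (0 : Int) ≤ (nums.length : Int) := by positivity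
    have hpos : 0 < List.count v nums := by omega
    exact List.count_pos_iff.mp hpos
  have hcand : ∀ v, q v = true → (s.1 = some v ∨ s.2.2.1 = some v) := by
    intro v hv
    rw [hs]
    exact bm_candidate (hqn v hv)
  have hmemB : ∀ v, v ∈ res ↔ ((s.1 = some v ∨ s.2.2.1 = some v) ∧ q v = true) := by
    intro v
    rw [hres, List.mem_filter]
    constructor
    · rintro ⟨hmemfm, hqv⟩
      refine ⟨?_, hqv⟩
      rcases List.mem_filterMap.mp hmemfm with ⟨o, ho, hov⟩
      rcases List.mem_cons.mp ho with rfl | ho'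
      · exact Or.inl hov
      · rcases List.mem_cons.mp ho' with rfl | ho''
        · exact Or.inr hov
        · cases ho''
    · rintro ⟨hd, hqv⟩
      refine ⟨?_, hqv⟩
      rcases hd with h | h
      · exact List.mem_filterMap.mpr ⟨s.1, List.mem_cons_self, h⟩
      · exact List.mem_filterMap.mpr ⟨s.2.2.1, by simp, h⟩
  have hsame : ∀ v, v ∈ (PySem.List.dedup nums).filter q ↔ v ∈ res := by
    intro v
    rw [List.mem_filter, PySem.List.mem_dedup, hmemB]
    constructor
    · rintro ⟨_, hqv⟩
      exact ⟨hcand v hqv, hqv⟩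
    · rintro ⟨_, hqv⟩
      exact ⟨hqmem v hqv, hqv⟩
  have hndA : ((PySem.List.dedup nums).filter q).Nodup := (PySem.List.nodup_dedup nums).filter _
  have hlen2 : res.length ≤ 2 := by
    rw [hres]
    exact le_trans (List.length_filter_le _ _) (le_trans (List.length_filterMap_le _ _) (by simp))
  have hndres : res.Nodup := by
    rw [hres]
    apply List.Nodup.filter
    rcases hc1 : s.1 with _ | u <;> rcases hc2 : s.2.2.1 with _ | w <;>
      simp [List.filterMap]
    -- both candidates present: they are distinct
    intro hw
    exact (hdist u hc1) (by rw [hc2, hw])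
  rcases hr : res with _ | ⟨a, _ | ⟨b, _ | ⟨c, t⟩⟩⟩
  · -- no heavy value
    have hA : (PySem.List.dedup nums).filter q = [] :=
      List.eq_nil_iff_forall_not_mem.mpr (fun v hv => by
        have := (hsame v).mp hv
        rw [hr] at this
        cases this)
    rw [hA]
    simp
  · -- exactly one heavy value
    have haA : a ∈ (PySem.List.dedup nums).filter q := (hsame a).mpr (by rw [hr]; exact List.mem_cons_self)
    have hA : (PySem.List.dedup nums).filter q = [a] :=
      eq_singleton_of_unique hndA haA (fun c hc => by
        have := (hsame c).mp hc
        rw [hr] at this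
        simpa using this)
    rw [hA]
    simp
  · -- two heavy values: agree up to the final first-occurrence ordering
    have hab : a ≠ b := by
      have h2 := hndres
      rw [hr] at h2
      rw [List.nodup_cons] at h2
      simpa using h2.1
    have hmm : ∀ x, x ∈ (PySem.List.dedup nums).filter q ↔ x = a ∨ x = b := by
      intro x
      rw [hsame, hr]
      simp
    have haM : a ∈ nums :=
      ((List.mem_filter.mp ((hmm a).mpr (Or.inl rfl))).1 |> (PySem.List.mem_dedup nums a).mp)
    have hbM : b ∈ nums :=
      ((List.mem_filter.mp ((hmm b).mpr (Or.inr rfl))).1 |> (PySem.List.mem_dedup nums b).mp)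
    have hpair := (dedup_pairwise_idx nums).filter q
    rcases nodup_two_mem hndA hab hmm with hA | hA
    · rw [hA] at hpair
      have hlt : nums.idxOf a < nums.idxOf b := (List.pairwise_cons.mp hpair).1 b (by simp)
      rw [hA]
      simp only [List.getD_cons_zero, List.getD_cons_succ]
      rw [getD_index?_of_mem haM, getD_index?_of_mem hbM]
      rw [if_neg (by omega : ¬ (([a, b] : List Int).length = 2 ∧ nums.idxOf a > nums.idxOf b))]
    · rw [hA] at hpair
      have hlt : nums.idxOf b < nums.idxOf a := (List.pairwise_cons.mp hpair).1 a (by simp)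
      rw [hA]
      simp only [List.getD_cons_zero, List.getD_cons_succ]
      rw [getD_index?_of_mem haM, getD_index?_of_mem hbM]
      rw [if_pos (by refine ⟨rfl, by omega⟩)]
      rfl
  · -- impossible: at most two candidates survive
    exfalso
    rw [hr] at hlen2
    simp at hlen2

-- ===== VERDICT (by name: the statement is the Claim_ definition above) =====
theorem majorityElementHashing_spec : Claim_equal_majorityElementHashing := by
  intro nums _
  unfold Spec_majorityElementHashing
  exact AB_eq nums
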